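-- pv_equiv track=rewrite | github.com/sethtroisi/cado-nfs | scripts/cadofactor/cadotask.py | read_blocks
-- ===== SOURCE A (Python) =====
-- def read_blocks(input):
--     """ Return blocks of consecutive non-empty lines from input
--
--     Whitespace is stripped; a line containing only whitespace is
--     considered empty. An empty block is never returned.
--
--     >>> list(Polysel1Task.read_blocks(['', 'a', 'b', '', 'c', '', '', 'd', 'e', '']))
--     [['a', 'b'], ['c'], ['d', 'e']]
--     """
--     block = []
--     for line in input:
--         line = line.strip()
--         if line:
--             block.append(line)
--         else:
--             if block:
--                 yield block
--             block = []
--     if block: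
--         yield block
-- ===== SOURCE B (Python) =====
-- def read_blocks(input):
--     """Two staged passes: find the positions of all blank (stripped-empty) lines,
--     then cut the stripped line list into the slices between consecutive blanks,
--     yielding only the non-empty slices."""
--     stripped = [line.strip() for line in input]
--     n = len(stripped)
--     bounds = [-1] + [i for i in range(n) if not stripped[i]] + [n]
--     for a, b in zip(bounds, bounds[1:]):
--         if b - a > 1:
--             yield stripped[a + 1:b]
-- ===== Notes on version B (the rewrite author's own statement) =====
-- stated objective: alternative
-- what changed: Replaces A's one-pass accumulator/flush generator by two staged passes: first compute the index positions of all blank stripped lines, then emit the non-empty slices of the stripped list cut between consecutive blank positions.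
import Mathlib
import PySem

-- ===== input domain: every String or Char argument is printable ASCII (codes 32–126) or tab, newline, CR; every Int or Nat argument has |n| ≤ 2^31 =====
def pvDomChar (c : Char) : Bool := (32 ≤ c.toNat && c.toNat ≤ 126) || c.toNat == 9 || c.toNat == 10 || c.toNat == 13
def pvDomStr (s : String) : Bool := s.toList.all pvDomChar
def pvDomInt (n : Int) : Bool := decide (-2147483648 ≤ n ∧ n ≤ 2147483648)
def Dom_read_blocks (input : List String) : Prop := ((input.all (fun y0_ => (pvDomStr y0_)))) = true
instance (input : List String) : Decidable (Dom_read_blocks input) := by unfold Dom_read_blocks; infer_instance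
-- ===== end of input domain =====

-- B replaces A's single-pass accumulator/flush generator by two staged passes:
-- it first computes the index positions of all blank lines, then cuts the
-- stripped list into the slices between consecutive blank positions (alternative decomposition, same cost).

-- ===== PORT A =====
-- A: generator with accumulator `block`, flushed on blank lines and at the end;
-- the yielded blocks are collected in order.
def read_blocks (input : List String) : List (List String) :=
  let st := input.foldl (fun (st : List (List String) × List String) line =>
      let l := PySem.Str.strip line
      if l != "" then (st.1, st.2 ++ [l])
      else if st.2 != [] then (st.1 ++ [st.2], ([] : List String))
      else (st.1, []))
    ([], [])
  if st.2 != [] then st.1 ++ [st.2] else st.1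

-- ===== PORT B =====
-- B: stripped = [line.strip() ...]; bounds = [-1] + [i in range(n) if not stripped[i]] + [n];
-- for consecutive (a, b) in zip(bounds, bounds[1:]) with b - a > 1 yield stripped[a+1:b].
def read_blocks_alt (input : List String) : List (List String) :=
  let stripped := input.map PySem.Str.strip
  let n : Int := stripped.length
  let bounds : List Int :=
    [-1] ++ (PySem.List.pyRange 0 n 1).filter (fun i => PySem.List.pyGetD stripped i "" == "") ++ [n]
  (bounds.zip (bounds.drop 1)).filterMap (fun ab =>
    if ab.2 - ab.1 > 1 then some (PySem.List.slice stripped (some (ab.1 + 1)) (some ab.2)) else none)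

-- ===== PRECONDITION & SPEC =====
def Spec_read_blocks (input : List String) (out : List (List String)) : Prop := out = read_blocks_alt input
instance (input : List String) (out : List (List String)) : Decidable (Spec_read_blocks input out) := by unfold Spec_read_blocks; infer_instance

-- ===== CLAIM (what is proved, stated in full; the proofs are below) =====
def Claim_equal_read_blocks : Prop := ∀ (input : List String), Dom_read_blocks input → Spec_read_blocks input (read_blocks input)

-- ===== LEMMAS AND PROOFS =====

-- canonical form: the blocks of maximal runs of non-empty lines
def pvBlocks : List String → List (List String)
  | [] => []
  | x :: xs =>
    if x = "" then pvBlocks xs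
    else (x :: xs.takeWhile (fun l => l != "")) :: pvBlocks (xs.dropWhile (fun l => l != ""))
termination_by s => s.length
decreasing_by
  · simp
  · have := List.length_dropWhile_le (fun l => l != "") xs
    simp only [List.length_cons]
    omega

-- A's loop step and final flush, over already-stripped lines
def pvStep (st : List (List String) × List String) (l : String) :
    List (List String) × List String :=
  if l != "" then (st.1, st.2 ++ [l])
  else if st.2 != [] then (st.1 ++ [st.2], ([] : List String))
  else (st.1, [])

def pvFinish (st : List (List String) × List String) : List (List String) :=
  if st.2 != [] then st.1 ++ [st.2] else st.1

theorem pvPortA_eq (input : List String) :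
    read_blocks input = pvFinish ((input.map PySem.Str.strip).foldl pvStep ([], [])) := by
  unfold read_blocks pvFinish
  rw [List.foldl_map]
  rfl

theorem pvFoldl_eq_pvBlocks (ls : List String) (acc : List (List String)) (block : List String) :
    pvFinish (ls.foldl pvStep (acc, block)) =
      acc ++ (if block = [] then pvBlocks ls
              else (block ++ ls.takeWhile (fun l => l != "")) ::
                    pvBlocks (ls.dropWhile (fun l => l != ""))) := by
  induction ls generalizing acc block with
  | nil =>
    simp only [List.foldl_nil, pvFinish, pvBlocks, List.takeWhile_nil, List.dropWhile_nil]
    split_ifs <;> simp_all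
  | cons l ls ih =>
    simp only [List.foldl_cons, pvStep]
    by_cases hl : l = ""
    · subst hl
      rw [if_neg (by simp)]
      by_cases hb : block = []
      · subst hb
        rw [if_neg (by simp), ih, if_pos rfl, if_pos rfl]
        simp [pvBlocks]
      · rw [if_pos (by simpa using hb), ih, if_pos rfl, if_neg hb]
        simp [pvBlocks, List.takeWhile, List.dropWhile]
    · rw [if_pos (by simpa using hl), ih, if_neg (by simp)]
      by_cases hb : block = []
      · subst hb
        rw [if_pos rfl]
        simp [pvBlocks, hl, List.takeWhile_cons, List.dropWhile_cons, (by simpa using hl : (l != "") = true)]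
      · rw [if_neg hb]
        simp [pvBlocks, hl, List.takeWhile_cons, List.dropWhile_cons, (by simpa using hl : (l != "") = true)]

theorem pvA_blocks (input : List String) :
    read_blocks input = pvBlocks (input.map PySem.Str.strip) := by
  rw [pvPortA_eq, pvFoldl_eq_pvBlocks]
  simp

-- B-side abstractions
def pvEmpties : List String → List Int
  | [] => []
  | x :: xs => (if x = "" then [(0:Int)] else []) ++ (pvEmpties xs).map (· + 1)

def pvPairs (L : List Int) : List (Int × Int) := L.zip (L.drop 1)

def pvCut (s : List String) (ps : List (Int × Int)) : List (List String) :=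
  ps.filterMap (fun ab =>
    if ab.2 - ab.1 > 1 then some (PySem.List.slice s (some (ab.1 + 1)) (some ab.2)) else none)

theorem pvEmpties_nonneg (s : List String) : ∀ y ∈ pvEmpties s, (0:Int) ≤ y := by
  induction s with
  | nil => simp [pvEmpties]
  | cons x xs ih =>
    intro y hy
    simp only [pvEmpties, List.mem_append, List.mem_map] at hy
    rcases hy with hy | ⟨z, hz, rfl⟩
    · split_ifs at hy <;> simp_all
    · have := ih z hz; omega

theorem pvBnd_nonneg (s : List String) :
    ∀ y ∈ pvEmpties s ++ [(s.length : Int)], (0:Int) ≤ y := by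
  intro y hy
  rcases List.mem_append.1 hy with h | h
  · exact pvEmpties_nonneg s y h
  · simp at h; omega

-- the filter over range in port B computes pvEmpties
theorem pvFilter_range (s : List String) :
    ((List.range s.length).filter (fun i => s.getD i "" == "")).map (fun (i : Nat) => (i : Int))
      = pvEmpties s := by
  induction s with
  | nil => simp [pvEmpties]
  | cons x xs ih =>
    rw [List.length_cons, List.range_succ_eq_map, List.filter_cons]
    have hmap : ((List.range xs.length).map Nat.succ).filter (fun i => (x :: xs).getD i "" == "")
        = ((List.range xs.length).filter (fun i => xs.getD i "" == "")).map Nat.succ := by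
      rw [List.filter_map]
      congr 1
    have hcast : (((List.range xs.length).filter (fun i => xs.getD i "" == "")).map Nat.succ).map (fun (i : Nat) => (i : Int))
        = (((List.range xs.length).filter (fun i => xs.getD i "" == "")).map (fun (i : Nat) => (i : Int))).map (· + 1) := by
      rw [List.map_map, List.map_map]
      apply List.map_congr_left
      intro a _
      simp [Nat.succ_eq_add_one]
    by_cases hx : x = ""
    · subst hx
      rw [if_pos (by simp), List.map_cons, hmap, hcast, ih]
      simp [pvEmpties]
    · rw [if_neg (by simp [hx]), hmap, hcast, ih]
      simp [pvEmpties, hx]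

theorem pvPortB_eq (input : List String) :
    read_blocks_alt input =
      pvCut (input.map PySem.Str.strip)
        (pvPairs ((-1) :: pvEmpties (input.map PySem.Str.strip)
                   ++ [((input.map PySem.Str.strip).length : Int)])) := by
  have h : (PySem.List.pyRange 0 ((input.map PySem.Str.strip).length : Int) 1).filter
        (fun i => PySem.List.pyGetD (input.map PySem.Str.strip) i "" == "")
      = pvEmpties (input.map PySem.Str.strip) := by
    rw [PySem.List.pyRange_zero_natCast, List.filter_map, ← pvFilter_range]
    congr 1
    apply List.filter_congr; intro a _
    simp [PySem.List.pyGetD_natCast]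
  simp only [read_blocks_alt, h]
  rfl

theorem pvSlice_cons_shift (x : String) (xs : List String) (a b : Int)
    (ha : 0 ≤ a) (hb : 0 ≤ b) :
    PySem.List.slice (x :: xs) (some (a + 1)) (some (b + 1))
      = PySem.List.slice xs (some a) (some b) := by
  rw [PySem.List.slice_toNat _ (by omega) (by omega), PySem.List.slice_toNat _ ha hb]
  have h1 : (a + 1).toNat = a.toNat + 1 := by omega
  have h2 : (b + 1).toNat = b.toNat + 1 := by omega
  rw [h1, h2, List.drop_succ_cons]
  congr 1
  omega

theorem pvCut_shift (x : String) (xs : List String) (L : List Int)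
    (h : ∀ y ∈ L, (-1:Int) ≤ y) :
    pvCut (x :: xs) (pvPairs (L.map (· + 1))) = pvCut xs (pvPairs L) := by
  unfold pvPairs pvCut
  rw [← List.map_drop, List.zip_map, List.filterMap_map]
  apply List.filterMap_congr
  intro ab hab
  obtain ⟨a, b⟩ := ab
  have ha : (-1:Int) ≤ a := h _ (List.of_mem_zip hab).1
  have hb : (-1:Int) ≤ b := h _ (List.mem_of_mem_drop (List.of_mem_zip hab).2)
  show (if b + 1 - (a + 1) > 1 then
          some (PySem.List.slice (x :: xs) (some (a + 1 + 1)) (some (b + 1))) else none)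
      = (if b - a > 1 then some (PySem.List.slice xs (some (a + 1)) (some b)) else none)
  rw [show (b + 1 - (a + 1) : Int) = b - a by ring]
  by_cases hc : b - a > 1
  · rw [if_pos hc, if_pos hc, pvSlice_cons_shift x xs (a + 1) b (by omega) (by omega)]
  · rw [if_neg hc, if_neg hc]

-- bounds of (x :: xs) from the bounds of xs
theorem pvBnd_cons (x : String) (xs : List String) :
    pvEmpties (x :: xs) ++ [(((x :: xs).length : Nat) : Int)]
      = (if x = "" then [(0:Int)] else [])
          ++ (pvEmpties xs ++ [(xs.length : Int)]).map (· + 1) := by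
  simp only [pvEmpties, List.length_cons, List.map_append, List.append_assoc]
  congr 2

theorem pvCut_eq_pvBlocks (s : List String) :
    pvCut s (pvPairs ((-1) :: pvEmpties s ++ [(s.length : Int)])) = pvBlocks s := by
  induction s with
  | nil => simp [pvEmpties, pvPairs, pvCut, pvBlocks]
  | cons x xs ih =>
    rw [List.cons_append] at ih ⊢
    rw [pvBnd_cons]
    by_cases hx : x = ""
    · subst hx
      rw [if_pos rfl]
      have hP : pvPairs ((-1) :: ([(0:Int)] ++ (pvEmpties xs ++ [(xs.length : Int)]).map (· + 1)))
          = (-1, 0) :: pvPairs (((-1 : Int) :: (pvEmpties xs ++ [(xs.length : Int)])).map (· + 1)) := rfl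
      rw [hP]
      unfold pvCut
      rw [List.filterMap_cons]
      rw [if_neg (by omega)]
      rw [show (List.filterMap _ (pvPairs (((-1 : Int) :: (pvEmpties xs ++ [(xs.length : Int)])).map (· + 1)))
            = pvCut ("" :: xs) (pvPairs (((-1 : Int) :: (pvEmpties xs ++ [(xs.length : Int)])).map (· + 1)))) from rfl]
      rw [pvCut_shift _ _ _ (by
        intro y hy
        rcases List.mem_cons.1 hy with rfl | hy
        · omega
        · have := pvBnd_nonneg xs y hy; omega)]
      rw [ih]
      simp [pvBlocks]
    · rw [if_neg hx, List.nil_append]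
      obtain ⟨l0, M, hL⟩ : ∃ l0 M, pvEmpties xs ++ [(xs.length : Int)] = l0 :: M := by
        cases h : pvEmpties xs ++ [(xs.length : Int)] with
        | nil => exact absurd h (by simp)
        | cons a b => exact ⟨a, b, rfl⟩
      have hl0 : (0:Int) ≤ l0 := pvBnd_nonneg xs l0 (hL ▸ List.mem_cons_self ..)
      rw [hL]
      have hP : pvPairs ((-1) :: (l0 :: M).map (· + 1))
          = (-1, l0 + 1) :: pvPairs ((l0 :: M).map (· + 1)) := rfl
      rw [hP]
      unfold pvCut
      rw [List.filterMap_cons]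
      rw [if_pos (by simp only []; omega)]
      rw [show (List.filterMap _ (pvPairs ((l0 :: M).map (· + 1)))
            = pvCut (x :: xs) (pvPairs ((l0 :: M).map (· + 1)))) from rfl]
      rw [pvCut_shift x xs (l0 :: M) (by
        intro y hy
        rcases List.mem_cons.1 hy with rfl | hy
        · omega
        · have := pvBnd_nonneg xs y (hL ▸ List.mem_cons_of_mem _ hy); omega)]
      -- head slice: (x :: xs)[0 : l0+1] = x :: xs.take l0.toNat
      have hsl : PySem.List.slice (x :: xs) (some ((-1:Int) + 1)) (some (l0 + 1))
          = x :: xs.take l0.toNat := by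
        rw [show ((-1:Int) + 1) = (0:Int) by ring, PySem.List.slice_zero_start,
            PySem.List.slice_to _ (by omega)]
        rw [show ((l0 + 1).toNat) = l0.toNat + 1 by omega]
        rfl
      rw [hsl]
      -- the IH, with bounds -1 :: l0 :: M
      rw [hL] at ih
      have hPxs : pvPairs ((-1) :: l0 :: M) = (-1, l0) :: pvPairs (l0 :: M) := rfl
      rw [hPxs] at ih
      unfold pvCut at ih
      by_cases hl0pos : l0 - (-1) > 1
      · -- l0 > 0: xs starts with a non-empty line
        have hsl2 : PySem.List.slice xs (some ((-1:Int) + 1)) (some l0) = xs.take l0.toNat := by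
          rw [show ((-1:Int) + 1) = (0:Int) by ring, PySem.List.slice_zero_start,
              PySem.List.slice_to _ (by omega)]
        have hfa : (fun (ab : Int × Int) => if ab.2 - ab.1 > 1 then
              some (PySem.List.slice xs (some (ab.1 + 1)) (some ab.2)) else none) ((-1:Int), l0)
            = some (xs.take l0.toNat) := by
          show (if l0 - (-1:Int) > 1 then
              some (PySem.List.slice xs (some ((-1:Int) + 1)) (some l0)) else none)
            = some (xs.take l0.toNat)
          rw [if_pos hl0pos, hsl2]
        rw [List.filterMap_cons_some
          (f := fun (ab : Int × Int) => if ab.2 - ab.1 > 1 then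
              some (PySem.List.slice xs (some (ab.1 + 1)) (some ab.2)) else none)
          (a := ((-1:Int), l0)) (l := pvPairs (l0 :: M)) hfa] at ih
        obtain ⟨y, r, rfl, hy⟩ : ∃ y r, xs = y :: r ∧ y ≠ "" := by
          cases xs with
          | nil =>
            refine absurd hL ?_
            intro hL
            simp [pvEmpties] at hL
            omega
          | cons y r =>
            refine ⟨y, r, rfl, ?_⟩
            intro hy
            subst hy
            rw [pvBnd_cons] at hL
            rw [if_pos rfl] at hL
            have : l0 = 0 := by
              have := (List.cons.injEq .. ▸ hL.symm).1
              omega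
            omega
        have hblk : pvBlocks ((y :: r) : List String)
            = ((y :: r.takeWhile (fun l => l != "")) : List String)
                :: pvBlocks (r.dropWhile (fun l => l != "")) := by
          rw [pvBlocks, if_neg hy]
        rw [hblk] at ih
        have h1 : (y :: r).take l0.toNat = y :: r.takeWhile (fun l => l != "") :=
          (List.cons.injEq .. ▸ ih).1
        have h2 : List.filterMap
              (fun ab => if ab.2 - ab.1 > 1 then
                some (PySem.List.slice (y :: r) (some (ab.1 + 1)) (some ab.2)) else none)
              (pvPairs (l0 :: M))
            = pvBlocks (r.dropWhile (fun l => l != "")) :=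
          (List.cons.injEq .. ▸ ih).2
        show ((x :: (y :: r).take l0.toNat) : List String)
              :: pvCut (y :: r) (pvPairs (l0 :: M)) = pvBlocks (x :: y :: r)
        rw [pvBlocks, if_neg hx]
        simp only [List.takeWhile_cons, List.dropWhile_cons,
          (by simpa using hy : (y != "") = true), if_true]
        rw [show pvCut (y :: r) (pvPairs (l0 :: M))
              = List.filterMap
                  (fun ab => if ab.2 - ab.1 > 1 then
                    some (PySem.List.slice (y :: r) (some (ab.1 + 1)) (some ab.2)) else none)
                  (pvPairs (l0 :: M)) from rfl, h2, h1]
      · -- l0 = 0: xs is empty or starts with a blank line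
        have hfn : (fun (ab : Int × Int) => if ab.2 - ab.1 > 1 then
              some (PySem.List.slice xs (some (ab.1 + 1)) (some ab.2)) else none) ((-1:Int), l0)
            = none := by
          show (if l0 - (-1:Int) > 1 then
              some (PySem.List.slice xs (some ((-1:Int) + 1)) (some l0)) else none) = none
          rw [if_neg hl0pos]
        rw [List.filterMap_cons_none
          (f := fun (ab : Int × Int) => if ab.2 - ab.1 > 1 then
              some (PySem.List.slice xs (some (ab.1 + 1)) (some ab.2)) else none)
          (a := ((-1:Int), l0)) (l := pvPairs (l0 :: M)) hfn] at ih
        have hl00 : l0 = 0 := by omega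
        subst hl00
        show ((x :: xs.take (0:Int).toNat) : List String)
              :: pvCut xs (pvPairs ((0:Int) :: M)) = pvBlocks (x :: xs)
        rw [show ((0:Int).toNat) = 0 from rfl, List.take_zero]
        rw [show pvCut xs (pvPairs ((0:Int) :: M))
              = List.filterMap
                  (fun ab => if ab.2 - ab.1 > 1 then
                    some (PySem.List.slice xs (some (ab.1 + 1)) (some ab.2)) else none)
                  (pvPairs ((0:Int) :: M)) from rfl, ih]
        cases xs with
        | nil => simp [pvBlocks, hx]
        | cons y r =>
          have hy : y = "" := by
            by_contra hy
            rw [pvBnd_cons, if_neg hy, List.nil_append] at hL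
            obtain ⟨z, K, hzK⟩ : ∃ z K, pvEmpties r ++ [(r.length : Int)] = z :: K := by
              cases h : pvEmpties r ++ [(r.length : Int)] with
              | nil => exact absurd h (by simp)
              | cons a b => exact ⟨a, b, rfl⟩
            rw [hzK] at hL
            have hz : (0:Int) ≤ z := pvBnd_nonneg r z (hzK ▸ List.mem_cons_self ..)
            have : z + 1 = 0 := (List.cons.injEq .. ▸ hL.symm).1.symm
            omega
          subst hy
          conv_rhs => rw [pvBlocks]
          rw [if_neg hx]
          simp [pvBlocks]

-- ===== VERDICT (by name: the statement is the Claim_ definition above) =====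
theorem read_blocks_spec : Claim_equal_read_blocks := by
  intro input _
  show read_blocks input = read_blocks_alt input
  rw [pvA_blocks, pvPortB_eq, pvCut_eq_pvBlocks]
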